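-- pv_equiv track=rewrite | github.com/Jagrmi-C/jagrmitest | test_intetics.py | output_answer
-- ===== SOURCE A (Python) =====
-- def is_palindrome(n):
--     """
--     Check if the number is a palindrome
--     :param n:
--     :return:
--     """
--     str_n = str(n)
--     return str_n == str_n[::-1]
--
-- def output_answer(lst_pr):
--     lst_pr.reverse()
--     max_number = 0
--     factor_1 = 0
--     factor_2 = 0
--
--     for num_1 in lst_pr:
--         for num_2 in lst_pr:
--             res = num_1 * num_2
--             if res > max_number and is_palindrome(res):
--                 max_number = res
--                 factor_1 = num_1
--                 factor_2 = num_2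
--     return max_number, factor_1, factor_2
-- ===== SOURCE B (Python) =====
-- def is_palindrome(n):
--     str_n = str(n)
--     return str_n == str_n[::-1]
--
--
-- def output_answer(lst_pr):
--     # Same in-place reverse side effect as the original.
--     lst_pr.reverse()
--     cands = [a * b for a in lst_pr for b in lst_pr if is_palindrome(a * b)]
--     best = max((p for p in cands if p > 0), default=0)
--     if best == 0:
--         return 0, 0, 0
--     return next((best, a, b) for a in lst_pr for b in lst_pr if a * b == best)
-- ===== Notes on version B (the rewrite author's own statement) =====
-- stated objective: idiomatic
-- what changed: A's single nested scan carrying a (max, factor1, factor2) running state is replaced by a pipeline: build the list of palindromic products, take the maximum of its positive entries with max(..., default=0), then locate the first factor pair attaining that maximum with next(); the all-zero default falls out of the empty-max case.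
import Mathlib
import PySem

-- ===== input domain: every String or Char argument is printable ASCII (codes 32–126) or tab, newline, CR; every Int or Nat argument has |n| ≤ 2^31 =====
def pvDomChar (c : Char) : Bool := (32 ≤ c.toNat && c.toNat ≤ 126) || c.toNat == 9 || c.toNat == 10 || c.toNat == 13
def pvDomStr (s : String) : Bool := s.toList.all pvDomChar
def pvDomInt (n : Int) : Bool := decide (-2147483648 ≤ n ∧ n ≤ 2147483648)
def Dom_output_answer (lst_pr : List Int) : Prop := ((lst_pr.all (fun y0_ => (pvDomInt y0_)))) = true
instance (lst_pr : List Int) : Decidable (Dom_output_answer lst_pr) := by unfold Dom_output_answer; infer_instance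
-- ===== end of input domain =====

-- B replaces A's single running-max-with-factors scan by an idiomatic pipeline: collect palindromic
-- products, take their positive max (default 0), then locate the first factor pair; same cost class.
-- Both A and B reverse the input list in place in Python (same side effect); the theorems are about
-- the return value.


-- ===== PORT A =====
-- is_palindrome: str(n) == str(n)[::-1]; s[::-1] via PySem.Str.slice? (never none for step -1)
def isPalindrome (n : Int) : Bool :=
  let str_n := PySem.Int.toStr n
  match PySem.Str.slice? str_n none none (-1) with
  | some r => str_n == r
  | none => false

def output_answer (lst_pr : List Int) : Int × Int × Int :=
  let l := lst_pr.reverse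
  l.foldl (fun st num_1 =>
    l.foldl (fun st num_2 =>
      let res := num_1 * num_2
      if res > st.1 && isPalindrome res then (res, num_1, num_2) else st) st) (0, 0, 0)

-- ===== PORT B =====
def output_answer_alt (lst_pr : List Int) : Int × Int × Int :=
  let l := lst_pr.reverse
  let cands := l.flatMap (fun a => (l.map (fun b => a * b)).filter (fun p => isPalindrome p))
  let best := (PySem.List.max? (cands.filter (fun p => 0 < p)) (fun x => x)).getD 0
  if best == 0 then (0, 0, 0)
  else
    match (l.flatMap (fun a => l.map (fun b => (a, b)))).find? (fun p => p.1 * p.2 == best) with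
    | some (a, b) => (best, a, b)
    | none => (0, 0, 0)   -- unreachable: best > 0 is attained by some pair (Source B's next() always yields)

-- ===== PRECONDITION & SPEC =====
def Spec_output_answer (lst_pr : List Int) (out : Int × Int × Int) : Prop := out = output_answer_alt lst_pr
instance (lst_pr : List Int) (out : Int × Int × Int) : Decidable (Spec_output_answer lst_pr out) := by unfold Spec_output_answer; infer_instance

-- ===== CLAIM (what is proved, stated in full; the proofs are below) =====
def Claim_equal_output_answer : Prop := ∀ (lst_pr : List Int), Dom_output_answer lst_pr → Spec_output_answer lst_pr (output_answer lst_pr)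

-- ===== LEMMAS AND PROOFS =====

-- A's inner-loop body, flattened to act on one (num_1, num_2) pair
def pvStep (st : Int × Int × Int) (p : Int × Int) : Int × Int × Int :=
  if p.1 * p.2 > st.1 && isPalindrome (p.1 * p.2) then (p.1 * p.2, p.1, p.2) else st

-- A's running max, value only
def pvMval (ps : List (Int × Int)) (m : Int) : Int :=
  ps.foldl (fun m p => if p.1 * p.2 > m && isPalindrome (p.1 * p.2) then p.1 * p.2 else m) m

theorem pv_nested_eq_flat (l : List Int) (i : Int × Int × Int) :
    l.foldl (fun st num_1 =>
      l.foldl (fun st num_2 =>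
        if num_1 * num_2 > st.1 && isPalindrome (num_1 * num_2) then (num_1 * num_2, num_1, num_2) else st) st) i
    = (l.flatMap (fun a => l.map (fun b => (a, b)))).foldl pvStep i := by
  have h : ∀ (t : List Int) (i : Int × Int × Int),
      (t.flatMap (fun a => l.map (fun b => (a, b)))).foldl pvStep i
      = t.foldl (fun st num_1 =>
          l.foldl (fun st num_2 =>
            if num_1 * num_2 > st.1 && isPalindrome (num_1 * num_2) then (num_1 * num_2, num_1, num_2) else st) st) i := by
    intro t
    induction t with
    | nil => intro i; rfl
    | cons a t ih =>
      intro i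
      simp only [List.flatMap_cons, List.foldl_append, List.foldl_cons, ih, List.foldl_map, pvStep]
  exact (h l i).symm

theorem pv_main (ps : List (Int × Int)) : ∀ (m f1 f2 : Int),
    (pvMval ps m = m ∧ ps.foldl pvStep (m, f1, f2) = (m, f1, f2)) ∨
    (pvMval ps m ≠ m ∧ isPalindrome (pvMval ps m) = true ∧ m < pvMval ps m ∧
      ∃ a b, ps.find? (fun p => p.1 * p.2 == pvMval ps m) = some (a, b) ∧
        ps.foldl pvStep (m, f1, f2) = (pvMval ps m, a, b)) := by
  induction ps with
  | nil => intro m f1 f2; exact Or.inl ⟨rfl, rfl⟩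
  | cons p t ih =>
    intro m f1 f2
    by_cases hc : (p.1 * p.2 > m && isPalindrome (p.1 * p.2)) = true
    · rw [Bool.and_eq_true] at hc
      have hgt : m < p.1 * p.2 := by
        have := hc.1; simp only [gt_iff_lt, decide_eq_true_eq] at this; exact this
      have hpal : isPalindrome (p.1 * p.2) = true := hc.2
      have hctrue : (p.1 * p.2 > m && isPalindrome (p.1 * p.2)) = true := Bool.and_eq_true _ _ ▸ hc
      have hfold : (p :: t).foldl pvStep (m, f1, f2) = t.foldl pvStep (p.1 * p.2, p.1, p.2) := by
        simp only [List.foldl_cons, pvStep, hctrue, if_true]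
      have hM : pvMval (p :: t) m = pvMval t (p.1 * p.2) := by
        simp only [pvMval, List.foldl_cons, hctrue, if_true]
      rcases ih (p.1 * p.2) p.1 p.2 with ⟨h1, h2⟩ | ⟨h1, h2, h3, a, b, h4, h5⟩
      · refine Or.inr ⟨by rw [hM, h1]; omega, by rw [hM, h1]; exact hpal, by rw [hM, h1]; exact hgt,
          p.1, p.2, ?_, by rw [hfold, h2, hM, h1]⟩
        simp [hM, h1]
      · refine Or.inr ⟨by rw [hM]; omega, by rw [hM]; exact h2, by rw [hM]; omega,
          a, b, ?_, by rw [hfold, h5, hM]⟩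
        rw [hM]
        simp only [List.find?_cons]
        have hbe : (p.1 * p.2 == pvMval t (p.1 * p.2)) = false := by
          simp only [beq_eq_false_iff_ne, ne_eq]; omega
        simp [hbe, h4]
    · have hcf : (p.1 * p.2 > m && isPalindrome (p.1 * p.2)) = false := by
        simpa using hc
      have hfold : (p :: t).foldl pvStep (m, f1, f2) = t.foldl pvStep (m, f1, f2) := by
        simp only [List.foldl_cons, pvStep, hcf, Bool.false_eq_true, if_false]
      have hM : pvMval (p :: t) m = pvMval t m := by
        simp only [pvMval, List.foldl_cons, hcf, Bool.false_eq_true, if_false]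
      rcases ih m f1 f2 with ⟨h1, h2⟩ | ⟨h1, h2, h3, a, b, h4, h5⟩
      · exact Or.inl ⟨by rw [hM, h1], by rw [hfold, h2]⟩
      · refine Or.inr ⟨by rw [hM]; exact h1, by rw [hM]; exact h2, by rw [hM]; exact h3,
          a, b, ?_, by rw [hfold, h5, hM]⟩
        rw [hM]
        simp only [List.find?_cons]
        have hne : (p.1 * p.2 == pvMval t m) = false := by
          simp only [beq_eq_false_iff_ne, ne_eq]
          intro he
          rcases Bool.and_eq_false_iff.mp hcf with hle | hnp
          · have : ¬ p.1 * p.2 > m := by simpa using hle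
            omega
          · rw [he, h2] at hnp; simp at hnp
        simp [hne, h4]

-- running max over pal-filtered values: drop the palindrome test into a filter
theorem pvMval_eq_max (ps : List (Int × Int)) : ∀ (m : Int),
    pvMval ps m = ((ps.map (fun p => p.1 * p.2)).filter (fun x => isPalindrome x)).foldl max m := by
  induction ps with
  | nil => intro m; rfl
  | cons p t ih =>
    intro m
    by_cases hp : isPalindrome (p.1 * p.2) = true
    · have hstep : (if p.1 * p.2 > m && isPalindrome (p.1 * p.2) then p.1 * p.2 else m) = max m (p.1 * p.2) := by
        by_cases hg : p.1 * p.2 > m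
        · simp [hg, hp]; omega
        · simp [hg]; omega
      simp only [pvMval, List.foldl_cons, List.map_cons]
      rw [hstep, List.filter_cons_of_pos (by simpa using hp), List.foldl_cons]
      exact ih (max m (p.1 * p.2))
    · have hcf : (p.1 * p.2 > m && isPalindrome (p.1 * p.2)) = false := by
        simp [show isPalindrome (p.1 * p.2) = false by simpa using hp]
      simp only [pvMval, List.foldl_cons, List.map_cons, hcf, Bool.false_eq_true, if_false]
      rw [List.filter_cons_of_neg (by simpa using hp)]
      exact ih m

-- a fold of max from a nonnegative start ignores the non-positive elements
theorem pv_fold_max_pos (xs : List Int) : ∀ (m : Int), 0 ≤ m →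
    xs.foldl max m = (xs.filter (fun p => 0 < p)).foldl max m := by
  induction xs with
  | nil => intro m _; rfl
  | cons x t ih =>
    intro m hm
    by_cases hx : (0 : Int) < x
    · have hd : (decide ((0:Int) < x)) = true := by simpa using hx
      simp only [List.foldl_cons, List.filter_cons, hd, if_pos]
      exact ih (max m x) (le_trans hm (le_max_left _ _))
    · have hd : (decide ((0:Int) < x)) = false := by simpa using hx
      have hmx : max m x = m := by omega
      simp only [List.foldl_cons, List.filter_cons, hd, Bool.false_eq_true, if_false, hmx]
      exact ih m hm

theorem pv_fold_max_zero (ys : List Int) (hpos : ∀ y ∈ ys, 0 < y) :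
    ys.foldl max 0 = ((PySem.List.max? ys (fun x => x)).getD 0) := by
  cases ys with
  | nil => rfl
  | cons y t =>
    rw [PySem.List.max?_id_cons]
    have hy : max (0:Int) y = y := by
      have := hpos y (List.mem_cons_self ..); omega
    simp [List.foldl_cons, hy]

-- ===== VERDICT (by name: the statement is the Claim_ definition above) =====
theorem output_answer_spec : Claim_equal_output_answer := by
  intro lst_pr _
  simp only [Spec_output_answer, output_answer, output_answer_alt]
  rw [pv_nested_eq_flat]
  set l := lst_pr.reverse with hl
  set ps := l.flatMap (fun a => l.map (fun b => (a, b))) with hps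
  -- B's candidate list is the pal-filter of the products of ps
  have hcands : l.flatMap (fun a => (l.map (fun b => a * b)).filter (fun p => isPalindrome p))
      = (ps.map (fun p => p.1 * p.2)).filter (fun x => isPalindrome x) := by
    rw [hps, List.map_flatMap, List.filter_flatMap]
    simp [List.map_map, Function.comp_def]
  have hposmem : ∀ y ∈ ((ps.map (fun p => p.1 * p.2)).filter (fun x => isPalindrome x)).filter (fun p => 0 < p), 0 < y := by
    intro y hy
    have := List.of_mem_filter hy
    simpa using this
  have hbest : ((PySem.List.max?
        ((l.flatMap (fun a => (l.map (fun b => a * b)).filter (fun p => isPalindrome p))).filter (fun p => 0 < p))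
        (fun x => x)).getD 0) = pvMval ps 0 := by
    rw [hcands, ← pv_fold_max_zero _ hposmem, ← pv_fold_max_pos _ 0 (le_refl 0), ← pvMval_eq_max]
  rw [hbest]
  rcases pv_main ps 0 0 0 with ⟨h1, h2⟩ | ⟨h1, h2, h3, a, b, h4, h5⟩
  · rw [h2, h1]
    simp
  · rw [h5]
    have hne : (pvMval ps 0 == (0:Int)) = false := by simpa using h1
    simp only [hne, Bool.false_eq_true, if_false, h4]
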